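-- pv_equiv track=rewrite | github.com/georgilos/Bert-for-text-classification | test.py | find_anchors
-- ===== SOURCE A (Python) =====
-- def find_anchors(must_link_pairs, cannot_link_pairs):
--     """
--     Identify anchors and their related instances.
--
--     Parameters:
--     - must_link_pairs: List of tuples representing must-link pairs.
--     - cannot_link_pairs: List of tuples representing cannot-link pairs.
--
--     Returns:
--     - Dictionary of anchors with related instances.
--     """
--     anchors = {}
--
--     # Collect relationships
--     for pair in must_link_pairs:
--         for instance in pair:
--             if instance not in anchors:
--                 anchors[instance] = {'must_link': set(), 'cannot_link': set()}
--             anchors[instance]['must_link'].update(pair)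
--
--     for pair in cannot_link_pairs:
--         for instance in pair:
--             if instance not in anchors:
--                 anchors[instance] = {'must_link': set(), 'cannot_link': set()}
--             anchors[instance]['cannot_link'].update(pair)
--
--     # Filter true anchors
--     true_anchors = {}
--     for anchor, relations in anchors.items():
--         if relations['must_link'] and relations['cannot_link']:
--             related_instances = relations['must_link'].union(relations['cannot_link'])
--             related_instances.discard(anchor)
--             true_anchors[anchor] = related_instances
--
--     return true_anchors
-- ===== SOURCE B (Python) =====
-- def find_anchors(must_link_pairs, cannot_link_pairs):
--     # Index-free rewrite: enumerate candidate anchors in first-appearance order over the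
--     # must-link pairs (every true anchor appears there), and for each candidate rescan
--     # both pair lists to gather its related instances.  No dict of relation sets is built.
--     cannot_elements = {e for p in cannot_link_pairs for e in p}
--     seen = set()
--     true_anchors = {}
--     for pair in must_link_pairs:
--         for x in pair:
--             if x not in seen:
--                 seen.add(x)
--                 if x in cannot_elements:
--                     related = set()
--                     for q in must_link_pairs:
--                         if x in q:
--                             related.update(q)
--                     for q in cannot_link_pairs:
--                         if x in q:
--                             related.update(q)
--                     related.discard(x)
--                     true_anchors[x] = related
--     return true_anchors
-- ===== Notes on version B (the rewrite author's own statement) =====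
-- stated objective: alternative
-- what changed: B builds no relation index at all: it walks the must-link pairs for candidate anchors in first-appearance order and, for each fresh candidate that also occurs in a cannot-link pair, rescans both pair lists to gather its related instances, replacing A's incrementally built dict of per-instance {'must_link','cannot_link'} set records and its truthiness filter.
import Mathlib
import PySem

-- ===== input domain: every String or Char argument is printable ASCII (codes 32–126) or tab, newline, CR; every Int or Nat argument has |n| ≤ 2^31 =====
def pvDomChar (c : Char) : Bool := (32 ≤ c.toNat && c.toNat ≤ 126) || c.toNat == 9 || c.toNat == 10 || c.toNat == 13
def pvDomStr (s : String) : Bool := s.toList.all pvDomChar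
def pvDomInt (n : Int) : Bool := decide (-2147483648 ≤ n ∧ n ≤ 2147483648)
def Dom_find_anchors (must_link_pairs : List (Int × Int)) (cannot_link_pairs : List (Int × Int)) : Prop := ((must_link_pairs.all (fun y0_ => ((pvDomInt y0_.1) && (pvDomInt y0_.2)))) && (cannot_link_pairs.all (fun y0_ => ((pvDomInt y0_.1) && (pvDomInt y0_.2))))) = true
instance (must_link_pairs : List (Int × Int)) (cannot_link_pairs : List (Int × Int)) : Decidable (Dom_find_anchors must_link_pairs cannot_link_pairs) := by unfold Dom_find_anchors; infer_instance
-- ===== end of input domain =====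

-- B drops A's incrementally built dict of per-instance relation-set records: it enumerates
-- candidate anchors in first-appearance order over the must-link pairs and rescans both pair
-- lists per candidate (objective: alternative index-free decomposition; not faster).

-- ===== PORT A =====
-- A's inner dict {'must_link': set, 'cannot_link': set} has the two fixed string keys, so it is
-- ported as the pair (must_link, cannot_link) : PySem.Set Int × PySem.Set Int.

-- body of A's first loop for one `instance` of `pair` (if-absent insert, then in-place update of 'must_link')
def faStep1 (pr : Int × Int) (d : PySem.Dict Int (PySem.Set Int × PySem.Set Int)) (i : Int) :
    PySem.Dict Int (PySem.Set Int × PySem.Set Int) :=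
  let d := if d.contains i then d else d.insert i (PySem.Set.empty, PySem.Set.empty)
  d.modify i (PySem.Set.empty, PySem.Set.empty) (fun r => (PySem.Set.update r.1 [pr.1, pr.2], r.2))

-- body of A's second loop for one `instance` of `pair` (updates 'cannot_link')
def faStep2 (pr : Int × Int) (d : PySem.Dict Int (PySem.Set Int × PySem.Set Int)) (i : Int) :
    PySem.Dict Int (PySem.Set Int × PySem.Set Int) :=
  let d := if d.contains i then d else d.insert i (PySem.Set.empty, PySem.Set.empty)
  d.modify i (PySem.Set.empty, PySem.Set.empty) (fun r => (r.1, PySem.Set.update r.2 [pr.1, pr.2]))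

def find_anchors (must_link_pairs : List (Int × Int)) (cannot_link_pairs : List (Int × Int)) : List (Int × List Int) :=
  -- anchors = {}; for pair in must_link_pairs: for instance in pair: …
  let anchors := must_link_pairs.foldl (fun d pr => [pr.1, pr.2].foldl (faStep1 pr) d) PySem.Dict.empty
  -- for pair in cannot_link_pairs: for instance in pair: …
  let anchors := cannot_link_pairs.foldl (fun d pr => [pr.1, pr.2].foldl (faStep2 pr) d) anchors
  -- true_anchors = {}; for anchor, relations in anchors.items(): if must and cannot: …
  let true_anchors := anchors.items.foldl (fun ta p =>
    if !p.2.1.isEmpty && !p.2.2.isEmpty then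
      ta.insert p.1 (PySem.Set.discard (PySem.Set.union p.2.1 p.2.2) p.1)
    else ta) PySem.Dict.empty
  true_anchors.items

-- ===== PORT B =====
-- cannot_elements = {e for pair in cannot_link_pairs for e in pair}
def fbCannotElems (cannot_link_pairs : List (Int × Int)) : PySem.Set Int :=
  PySem.Set.ofList (cannot_link_pairs.flatMap (fun p => [p.1, p.2]))

-- one rescan loop of Source B: `for q in pairs: if x in q: related.update(q)`
def fbGather (pairs : List (Int × Int)) (x : Int) (s : PySem.Set Int) : PySem.Set Int :=
  pairs.foldl (fun s q => if x == q.1 || x == q.2 then PySem.Set.update s [q.1, q.2] else s) s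

-- body of Source B's inner loop for one element x of a must-link pair
def fbStep (must cannot : List (Int × Int)) (ce : PySem.Set Int)
    (st : PySem.Set Int × PySem.Dict Int (List Int)) (x : Int) :
    PySem.Set Int × PySem.Dict Int (List Int) :=
  if st.1.contains x then st
  else
    let seen := PySem.Set.add st.1 x
    if ce.contains x then
      let related := fbGather cannot x (fbGather must x PySem.Set.empty)
      (seen, st.2.insert x (PySem.Set.discard related x))
    else (seen, st.2)

def find_anchors_alt (must_link_pairs : List (Int × Int)) (cannot_link_pairs : List (Int × Int)) : List (Int × List Int) :=
  let ce := fbCannotElems cannot_link_pairs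
  let st := must_link_pairs.foldl
    (fun st pr => [pr.1, pr.2].foldl (fbStep must_link_pairs cannot_link_pairs ce) st)
    (PySem.Set.empty, PySem.Dict.empty)
  st.2.items

-- ===== PRECONDITION & SPEC =====
def Spec_find_anchors (must_link_pairs : List (Int × Int)) (cannot_link_pairs : List (Int × Int)) (out : List (Int × List Int)) : Prop := out = find_anchors_alt must_link_pairs cannot_link_pairs
instance (must_link_pairs : List (Int × Int)) (cannot_link_pairs : List (Int × Int)) (out : List (Int × List Int)) : Decidable (Spec_find_anchors must_link_pairs cannot_link_pairs out) := by unfold Spec_find_anchors; infer_instance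

-- ===== CLAIM (what is proved, stated in full; the proofs are below) =====
def Claim_equal_find_anchors : Prop := ∀ (must_link_pairs : List (Int × Int)) (cannot_link_pairs : List (Int × Int)), Dom_find_anchors must_link_pairs cannot_link_pairs → Spec_find_anchors must_link_pairs cannot_link_pairs (find_anchors must_link_pairs cannot_link_pairs)

-- ===== LEMMAS AND PROOFS =====

-- per-key value of an occurrence fold
def gset (x : Int) (os : List (Int × (Int × Int))) (s : PySem.Set Int) : PySem.Set Int :=
  os.foldl (fun s ip => if ip.1 = x then PySem.Set.update s [ip.2.1, ip.2.2] else s) s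

-- generic shape of A's loop bodies
def genStep {σ : Type} (upd : (Int × Int) → σ → σ) (dflt : σ) (q : Int × Int)
    (d : PySem.Dict Int σ) (i : Int) : PySem.Dict Int σ :=
  let d := if d.contains i then d else d.insert i dflt
  d.modify i dflt (upd q)

theorem genStep_eq {σ : Type} (upd : (Int × Int) → σ → σ) (dflt : σ) (q : Int × Int)
    (d : PySem.Dict Int σ) (i : Int) :
    genStep upd dflt q d i = d.insert i (upd q (d.getD i dflt)) := by
  unfold genStep
  cases hc : d.contains i
  · simp only [Bool.false_eq_true, if_false, PySem.Dict.modify]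
    rw [PySem.Dict.getD_insert_self, PySem.Dict.insert_insert_self,
        PySem.Dict.getD_of_not_contains d _ hc]
  · simp [PySem.Dict.modify]

theorem get?_mapkeys {σ : Type} (K : List Int) (v : Int → σ) (i : Int) :
    (PySem.Dict.mk (K.map (fun x => (x, v x)))).get? i
      = if i ∈ K then some (v i) else none := by
  induction K with
  | nil => simp [PySem.Dict.get?]
  | cons y K ih =>
    rw [List.map_cons, PySem.Dict.get?_mk_cons]
    by_cases hy : y = i
    · subst hy; simp
    · simp only [beq_iff_eq, hy, if_false, ih, List.mem_cons]
      have : ¬ i = y := fun h => hy h.symm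
      simp [this]

theorem contains_mapkeys {σ : Type} (K : List Int) (v : Int → σ) (i : Int) :
    (PySem.Dict.mk (K.map (fun x => (x, v x)))).contains i = decide (i ∈ K) := by
  rw [PySem.Dict.contains_eq_isSome_get?, get?_mapkeys]
  by_cases h : i ∈ K <;> simp [h]

theorem genStep_mapkeys {σ : Type} (upd : (Int × Int) → σ → σ) (dflt : σ) (q : Int × Int)
    (K : List Int) (v : Int → σ) (hv : ∀ x, x ∉ K → v x = dflt) (i : Int) :
    genStep upd dflt q (PySem.Dict.mk (K.map (fun x => (x, v x)))) i
      = PySem.Dict.mk ((PySem.Set.add K i).map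
          (fun x => (x, if x = i then upd q (v i) else v x))) := by
  rw [genStep_eq]
  have hgetD : (PySem.Dict.mk (K.map (fun x => (x, v x)))).getD i dflt = v i := by
    rw [PySem.Dict.getD_eq_get?_getD, get?_mapkeys]
    by_cases h : i ∈ K
    · simp [h]
    · simp [h, hv i h]
  rw [hgetD]
  by_cases hm : i ∈ K
  · apply PySem.Dict.ext
    rw [PySem.Dict.items_insert_of_contains _ _ (by rw [contains_mapkeys]; simpa using hm)]
    rw [PySem.Set.add_of_mem hm]
    show (K.map _).map _ = K.map _
    rw [List.map_map]
    apply List.map_congr_left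
    intro x _
    by_cases hx : x = i
    · subst hx; simp
    · simp [Function.comp, hx]
  · apply PySem.Dict.ext
    rw [PySem.Dict.items_insert_of_not_contains _ _ (by rw [contains_mapkeys]; simpa using hm)]
    rw [PySem.Set.add_of_not_mem hm]
    show K.map _ ++ _ = (K ++ [i]).map _
    rw [List.map_append]
    congr 1
    · apply List.map_congr_left
      intro x hx
      have : x ≠ i := fun h => hm (h ▸ hx)
      simp [this]
    · simp

theorem foldl_genStep {σ : Type} (upd : (Int × Int) → σ → σ) (dflt : σ)
    (os : List (Int × (Int × Int))) :
    ∀ (K : List Int) (v : Int → σ), (∀ x, x ∉ K → v x = dflt) →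
    os.foldl (fun d ip => genStep upd dflt ip.2 d ip.1)
        (PySem.Dict.mk (K.map (fun x => (x, v x))))
      = PySem.Dict.mk ((PySem.Set.update K (os.map (·.1))).map
          (fun x => (x, os.foldl (fun s ip => if ip.1 = x then upd ip.2 s else s) (v x)))) := by
  induction os with
  | nil => intro K v hv; simp [PySem.Set.update_nil]
  | cons ip os ih =>
    intro K v hv
    rw [List.foldl_cons, genStep_mapkeys upd dflt ip.2 K v hv ip.1]
    rw [ih (PySem.Set.add K ip.1) (fun x => if x = ip.1 then upd ip.2 (v ip.1) else v x)
        (by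
          intro x hx
          rw [PySem.Set.mem_add] at hx
          push Not at hx
          simp only []
          rw [if_neg hx.2]
          exact hv x hx.1)]
    rw [List.map_cons, PySem.Set.update_cons]
    congr 1
    apply List.map_congr_left
    intro x _
    by_cases hx : x = ip.1
    · subst hx; simp [List.foldl_cons]
    · simp only [List.foldl_cons]
      rw [if_neg hx, if_neg (fun h => hx h.symm)]

theorem foldl_pairs_occ {β : Type} (g : (Int × Int) → β → Int → β) (l : List (Int × Int)) (d : β) :
    l.foldl (fun d pr => [pr.1, pr.2].foldl (g pr) d) d
      = (l.flatMap (fun p => [(p.1, p), (p.2, p)])).foldl (fun d ip => g ip.2 d ip.1) d := by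
  induction l generalizing d with
  | nil => rfl
  | cons p l ih => simp only [List.foldl_cons, List.flatMap_cons, List.foldl_append]; exact ih _

theorem foldl_pairs_flat {β : Type} (g : β → Int → β) (l : List (Int × Int)) (d : β) :
    l.foldl (fun d pr => [pr.1, pr.2].foldl g d) d = (l.flatMap (fun p => [p.1, p.2])).foldl g d := by
  induction l generalizing d with
  | nil => rfl
  | cons p l ih => simp only [List.foldl_cons, List.flatMap_cons, List.foldl_append]; exact ih _

theorem occ_map_fst (l : List (Int × Int)) :
    (l.flatMap (fun p => [(p.1, p), (p.2, p)])).map (·.1) = l.flatMap (fun p => [p.1, p.2]) := by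
  simp [List.map_flatMap]

-- component splitting of the value folds
theorem foldl_fst_comp (x : Int) (os : List (Int × (Int × Int))) (a b : PySem.Set Int) :
    os.foldl (fun s ip => if ip.1 = x then
        ((fun q (r : PySem.Set Int × PySem.Set Int) => (PySem.Set.update r.1 [q.1, q.2], r.2)) ip.2 s)
      else s) (a, b) = (gset x os a, b) := by
  induction os generalizing a with
  | nil => rfl
  | cons ip os ih =>
    rw [List.foldl_cons]
    unfold gset
    rw [List.foldl_cons]
    by_cases hc : ip.1 = x
    · rw [if_pos hc, if_pos hc]; exact ih _
    · rw [if_neg hc, if_neg hc]; exact ih _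

theorem foldl_snd_comp (x : Int) (os : List (Int × (Int × Int))) (a b : PySem.Set Int) :
    os.foldl (fun s ip => if ip.1 = x then
        ((fun q (r : PySem.Set Int × PySem.Set Int) => (r.1, PySem.Set.update r.2 [q.1, q.2])) ip.2 s)
      else s) (a, b) = (a, gset x os b) := by
  induction os generalizing b with
  | nil => rfl
  | cons ip os ih =>
    rw [List.foldl_cons]
    unfold gset
    rw [List.foldl_cons]
    by_cases hc : ip.1 = x
    · rw [if_pos hc, if_pos hc]; exact ih _
    · rw [if_neg hc, if_neg hc]; exact ih _

theorem gset_of_no_occ (x : Int) (os : List (Int × (Int × Int))) (s : PySem.Set Int)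
    (h : ∀ ip ∈ os, ip.1 ≠ x) : gset x os s = s := by
  unfold gset
  induction os generalizing s with
  | nil => rfl
  | cons ip os ih =>
    rw [List.foldl_cons, if_neg (h ip (by simp))]
    exact ih _ (fun q hq => h q (by simp [hq]))

theorem update_ne_nil (s : PySem.Set Int) (a b : Int) :
    PySem.Set.update s [a, b] ≠ [] := by
  have : a ∈ PySem.Set.update s [a, b] := by
    rw [PySem.Set.mem_update]; simp
  exact List.ne_nil_of_mem this

theorem gset_ne_nil_of_ne_nil (x : Int) (os : List (Int × (Int × Int))) (s : PySem.Set Int)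
    (h : s ≠ []) : gset x os s ≠ [] := by
  unfold gset
  induction os generalizing s with
  | nil => exact h
  | cons ip os ih =>
    rw [List.foldl_cons]
    by_cases hc : ip.1 = x
    · rw [if_pos hc]
      exact ih _ (by rw [PySem.Set.update_eq_append_filter]; simp [h])
    · rw [if_neg hc]; exact ih _ h

theorem gset_ne_nil (x : Int) (os : List (Int × (Int × Int))) (s : PySem.Set Int)
    (h : ∃ ip ∈ os, ip.1 = x) : gset x os s ≠ [] := by
  induction os generalizing s with
  | nil => obtain ⟨ip, h, _⟩ := h; cases h
  | cons jp os ih =>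
    unfold gset
    rw [List.foldl_cons]
    by_cases hc : jp.1 = x
    · rw [if_pos hc]
      exact gset_ne_nil_of_ne_nil x os _ (update_ne_nil _ _ _)
    · rw [if_neg hc]
      obtain ⟨ip, hm, hx⟩ := h
      rcases List.mem_cons.mp hm with h1 | h1
      · exact absurd (h1 ▸ hx) hc
      · exact ih _ ⟨ip, h1, hx⟩

-- updating twice with the same elements is one update
theorem update_update_self (s : PySem.Set Int) (l : List Int) :
    PySem.Set.update (PySem.Set.update s l) l = PySem.Set.update s l := by
  rw [PySem.Set.update_eq_append_filter (PySem.Set.update s l) l]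
  have : (PySem.Set.ofList l).filter (fun y => !(PySem.Set.contains (PySem.Set.update s l) y)) = [] := by
    rw [List.filter_eq_nil_iff]
    intro y hy
    rw [PySem.Set.mem_ofList] at hy
    simp [PySem.Set.mem_update, hy]
  rw [this, List.append_nil]

theorem gather_eq_gset (pairs : List (Int × Int)) (x : Int) (s : PySem.Set Int) :
    fbGather pairs x s = gset x (pairs.flatMap (fun p => [(p.1, p), (p.2, p)])) s := by
  induction pairs generalizing s with
  | nil => rfl
  | cons p ps ih =>
    unfold fbGather gset
    rw [List.flatMap_cons, List.foldl_cons, List.foldl_append, List.foldl_cons, List.foldl_cons,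
        List.foldl_nil]
    show _ = (ps.flatMap _).foldl _ _
    rw [← gset, ← fbGather, ← ih]
    congr 1
    by_cases h1 : p.1 = x <;> by_cases h2 : p.2 = x
    · simp only [h1, h2, beq_self_eq_true, Bool.true_or, if_pos]
      rw [update_update_self]
    · have : (x == p.1 || x == p.2) = true := by simp [h1]
      rw [this, if_pos rfl, if_pos h1, if_neg h2]
    · have : (x == p.1 || x == p.2) = true := by simp [h2]
      rw [this, if_pos rfl, if_neg h1, if_pos h2]
    · have : (x == p.1 || x == p.2) = false := by
        have e1 : x ≠ p.1 := fun h => h1 h.symm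
        have e2 : x ≠ p.2 := fun h => h2 h.symm
        simp [e1, e2]
      rw [this, if_neg h1, if_neg h2]
      simp

theorem update_assoc (s t : PySem.Set Int) (l : List Int) :
    PySem.Set.update s (PySem.Set.update t l) = PySem.Set.update (PySem.Set.update s t) l := by
  induction l generalizing t with
  | nil => rfl
  | cons y l ih =>
    rw [PySem.Set.update_cons, PySem.Set.update_cons, ih]
    congr 1
    by_cases hy : y ∈ t
    · rw [PySem.Set.add_of_mem hy, PySem.Set.add_of_mem (by rw [PySem.Set.mem_update]; exact Or.inr hy)]
    · rw [PySem.Set.add_of_not_mem hy, PySem.Set.update_append]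
      rfl

theorem update_gset (x : Int) (os : List (Int × (Int × Int))) (s t : PySem.Set Int) :
    PySem.Set.update s (gset x os t) = gset x os (PySem.Set.update s t) := by
  induction os generalizing t with
  | nil => rfl
  | cons ip os ih =>
    unfold gset
    rw [List.foldl_cons, List.foldl_cons]
    by_cases hc : ip.1 = x
    · rw [if_pos hc, if_pos hc, ← gset, ← gset, ih, update_assoc]
    · rw [if_neg hc, if_neg hc, ← gset, ← gset, ih]

-- fold of conditional fresh inserts over distinct keys
theorem foldl_insert_if_fresh {σ : Type} (c : Int → Bool) (w : Int → σ) :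
    ∀ (K : List Int) (d : PySem.Dict Int σ), K.Nodup → (∀ x ∈ K, d.contains x = false) →
    (K.foldl (fun ta x => if c x then ta.insert x (w x) else ta) d).items
      = d.items ++ (K.filter c).map (fun x => (x, w x)) := by
  intro K
  induction K with
  | nil => intro d _ _; simp
  | cons y K ih =>
    intro d hnd hfresh
    rw [List.foldl_cons, List.filter_cons]
    by_cases hc : c y
    · rw [if_pos hc, if_pos hc]
      rw [ih (d.insert y (w y)) (List.nodup_cons.mp hnd).2 ?_]
      · rw [PySem.Dict.items_insert_of_not_contains _ _ (hfresh y (by simp))]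
        simp
      · intro x hx
        rw [PySem.Dict.contains_insert]
        have : x ≠ y := fun h => (List.nodup_cons.mp hnd).1 (h ▸ hx)
        simp [this, hfresh x (by simp [hx])]
    · rw [if_neg (by simp [hc]), if_neg (by simp [hc])]
      exact ih d (List.nodup_cons.mp hnd).2 (fun x hx => hfresh x (by simp [hx]))

theorem discard_filter (s : List Int) (x : Int) (p : Int → Bool) :
    (PySem.Set.discard s x).filter p = s.filter (fun y => p y && !(y == x)) := by
  show (s.filter _).filter _ = _
  rw [List.filter_filter]

theorem filt_snoc (seen : List Int) (x : Int) (c : Int → Bool) (y : Int) :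
    (!(List.contains seen y) && c y && !(y == x))
      = (!(List.contains (seen ++ [x]) y) && c y) := by
  by_cases hy : y = x
  · subst hy; simp
  · by_cases hs : y ∈ seen <;> simp [hy, hs]

theorem fbStep_mem (must cannot : List (Int × Int)) (ce : PySem.Set Int)
    (st : PySem.Set Int × PySem.Dict Int (List Int)) (x : Int)
    (hx : st.1.contains x = true) : fbStep must cannot ce st x = st := by
  unfold fbStep; rw [if_pos hx]

theorem fbStep_new_in (must cannot : List (Int × Int)) (ce : PySem.Set Int)
    (st : PySem.Set Int × PySem.Dict Int (List Int)) (x : Int)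
    (hx : st.1.contains x = false) (hce : ce.contains x = true) :
    fbStep must cannot ce st x
      = (PySem.Set.add st.1 x, st.2.insert x
          (PySem.Set.discard (fbGather cannot x (fbGather must x PySem.Set.empty)) x)) := by
  unfold fbStep; rw [if_neg (by rw [hx]; exact Bool.false_ne_true), if_pos hce]

theorem fbStep_new_out (must cannot : List (Int × Int)) (ce : PySem.Set Int)
    (st : PySem.Set Int × PySem.Dict Int (List Int)) (x : Int)
    (hx : st.1.contains x = false) (hce : ce.contains x = false) :
    fbStep must cannot ce st x = (PySem.Set.add st.1 x, st.2) := by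
  unfold fbStep; rw [if_neg (by rw [hx]; exact Bool.false_ne_true), if_neg (by rw [hce]; exact Bool.false_ne_true)]

theorem fbFold (must cannot : List (Int × Int)) (ce : PySem.Set Int) :
    ∀ (l : List Int) (seen : PySem.Set Int) (ta : PySem.Dict Int (List Int)),
    (∀ x, ta.contains x = true → x ∈ seen) →
    (l.foldl (fbStep must cannot ce) (seen, ta)).2.items
      = ta.items ++ ((PySem.Set.ofList l).filter
            (fun x => !(List.contains seen x) && ce.contains x)).map
          (fun x => (x, PySem.Set.discard (fbGather cannot x (fbGather must x PySem.Set.empty)) x)) := by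
  intro l
  induction l with
  | nil => intro seen ta _; simp [PySem.Set.ofList_nil]
  | cons x l ih =>
    intro seen ta hfresh
    rw [List.foldl_cons, PySem.Set.ofList_cons, List.filter_cons]
    cases hx : List.contains seen x with
    | true =>
      rw [fbStep_mem must cannot ce (seen, ta) x hx]
      rw [ih seen ta hfresh, discard_filter]
      rw [if_neg (by simp)]
      congr 2
      apply List.filter_congr
      intro y _
      by_cases hy : y = x
      · subst hy
        have hm : y ∈ seen := by simpa using hx
        simp [hm]
      · have : (y == x) = false := by simpa using hy
        simp [this]
    | false =>
      have hxm : x ∉ seen := by simpa using hx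
      have hadd : PySem.Set.add seen x = seen ++ [x] := PySem.Set.add_of_not_mem hxm
      cases hce : ce.contains x with
      | false =>
        rw [fbStep_new_out must cannot ce (seen, ta) x hx hce]
        rw [if_neg (by simp)]
        rw [ih (PySem.Set.add seen x) ta
            (fun y hy => by rw [hadd]; exact List.mem_append_left _ (hfresh y hy))]
        rw [hadd, discard_filter]
        congr 2
        apply List.filter_congr
        intro y _
        rw [filt_snoc seen x (fun z => ce.contains z) y]
      | true =>
        rw [fbStep_new_in must cannot ce (seen, ta) x hx hce]
        rw [if_pos (by simp)]
        have htax : ta.contains x = false := by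
          cases h : ta.contains x
          · rfl
          · exact absurd (hfresh x h) hxm
        rw [ih (PySem.Set.add seen x) _
            (fun y hy => by
              rw [PySem.Dict.contains_insert] at hy
              rw [hadd]
              rcases Bool.or_eq_true_iff.mp hy with h | h
              · exact List.mem_append_right _ (by simpa using h)
              · exact List.mem_append_left _ (hfresh y h))]
        rw [PySem.Dict.items_insert_of_not_contains _ _ htax]
        rw [hadd, discard_filter, List.map_cons, List.append_assoc, List.singleton_append]
        congr 3
        apply List.filter_congr
        intro y _
        rw [filt_snoc seen x (fun z => ce.contains z) y]

theorem not_occ (l : List (Int × Int)) (x : Int)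
    (hx : x ∉ l.flatMap (fun p => [p.1, p.2])) :
    ∀ ip ∈ l.flatMap (fun p => [(p.1, p), (p.2, p)]), ip.1 ≠ x := by
  intro ip hip h
  apply hx
  rw [← occ_map_fst]
  exact List.mem_map.mpr ⟨ip, hip, h⟩

theorem exists_occ (l : List (Int × Int)) (x : Int)
    (hx : x ∈ l.flatMap (fun p => [p.1, p.2])) :
    ∃ ip ∈ l.flatMap (fun p => [(p.1, p), (p.2, p)]), ip.1 = x := by
  rw [← occ_map_fst] at hx
  obtain ⟨ip, hip, h⟩ := List.mem_map.mp hx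
  exact ⟨ip, hip, h⟩

-- the common canonical form both ports reach
theorem A_canonical (m c : List (Int × Int)) :
    find_anchors m c
      = ((PySem.Set.ofList (m.flatMap (fun p => [p.1, p.2]))).filter
            (fun x => (fbCannotElems c).contains x)).map
          (fun x => (x, PySem.Set.discard (fbGather c x (fbGather m x PySem.Set.empty)) x)) := by
  unfold find_anchors
  show ((c.foldl (fun d pr => [pr.1, pr.2].foldl (faStep2 pr) d)
        (m.foldl (fun d pr => [pr.1, pr.2].foldl (faStep1 pr) d) PySem.Dict.empty)).items.foldl
      (fun ta p => if !p.2.1.isEmpty && !p.2.2.isEmpty then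
          ta.insert p.1 (PySem.Set.discard (PySem.Set.union p.2.1 p.2.2) p.1) else ta)
      PySem.Dict.empty).items = _
  -- phase 1: the must-link loop builds the keyed map of (must set, ∅) records
  have hA1 : m.foldl (fun d pr => [pr.1, pr.2].foldl (faStep1 pr) d) PySem.Dict.empty
      = PySem.Dict.mk ((PySem.Set.ofList (m.flatMap (fun p => [p.1, p.2]))).map
          (fun x => (x, (gset x (m.flatMap (fun p => [(p.1, p), (p.2, p)])) PySem.Set.empty,
                         (PySem.Set.empty : PySem.Set Int))))) := by
    rw [foldl_pairs_occ faStep1 m PySem.Dict.empty]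
    rw [show (PySem.Dict.empty : PySem.Dict Int (PySem.Set Int × PySem.Set Int))
        = PySem.Dict.mk (([] : List Int).map
            (fun x => (x, ((PySem.Set.empty, PySem.Set.empty) : PySem.Set Int × PySem.Set Int)))) from rfl]
    rw [show (fun (d : PySem.Dict Int (PySem.Set Int × PySem.Set Int)) (ip : Int × (Int × Int)) =>
          faStep1 ip.2 d ip.1)
        = (fun d ip => genStep (fun q r => (PySem.Set.update r.1 [q.1, q.2], r.2))
            (PySem.Set.empty, PySem.Set.empty) ip.2 d ip.1) from rfl]
    rw [foldl_genStep _ _ _ [] _ (fun _ _ => rfl)]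
    rw [occ_map_fst, PySem.Set.update_nil_left]
    congr 1
    apply List.map_congr_left
    intro x _
    rw [foldl_fst_comp]
  rw [hA1]
  -- phase 2: the cannot-link loop fills in the cannot sets (and appends cannot-only keys)
  have hA2 : c.foldl (fun d pr => [pr.1, pr.2].foldl (faStep2 pr) d)
        (PySem.Dict.mk ((PySem.Set.ofList (m.flatMap (fun p => [p.1, p.2]))).map
          (fun x => (x, (gset x (m.flatMap (fun p => [(p.1, p), (p.2, p)])) PySem.Set.empty,
                         (PySem.Set.empty : PySem.Set Int))))))
      = PySem.Dict.mk ((PySem.Set.update (PySem.Set.ofList (m.flatMap (fun p => [p.1, p.2])))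
            (c.flatMap (fun p => [p.1, p.2]))).map
          (fun x => (x, (gset x (m.flatMap (fun p => [(p.1, p), (p.2, p)])) PySem.Set.empty,
                         gset x (c.flatMap (fun p => [(p.1, p), (p.2, p)])) PySem.Set.empty)))) := by
    rw [foldl_pairs_occ faStep2 c _]
    rw [show (fun (d : PySem.Dict Int (PySem.Set Int × PySem.Set Int)) (ip : Int × (Int × Int)) =>
          faStep2 ip.2 d ip.1)
        = (fun d ip => genStep (fun q r => (r.1, PySem.Set.update r.2 [q.1, q.2]))
            (PySem.Set.empty, PySem.Set.empty) ip.2 d ip.1) from rfl]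
    rw [foldl_genStep _ _ _ _ _ (fun x hx => by
      rw [PySem.Set.mem_ofList] at hx
      rw [gset_of_no_occ x _ _ (not_occ m x hx)])]
    rw [occ_map_fst]
    congr 1
    apply List.map_congr_left
    intro x _
    rw [foldl_snd_comp]
  rw [hA2]
  -- phase 3: the filtering loop over items
  rw [show (PySem.Dict.mk ((PySem.Set.update (PySem.Set.ofList (m.flatMap (fun p => [p.1, p.2])))
        (c.flatMap (fun p => [p.1, p.2]))).map
      (fun x => (x, (gset x (m.flatMap (fun p => [(p.1, p), (p.2, p)])) PySem.Set.empty,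
                     gset x (c.flatMap (fun p => [(p.1, p), (p.2, p)])) PySem.Set.empty))))).items
      = (PySem.Set.update (PySem.Set.ofList (m.flatMap (fun p => [p.1, p.2])))
        (c.flatMap (fun p => [p.1, p.2]))).map
      (fun x => (x, (gset x (m.flatMap (fun p => [(p.1, p), (p.2, p)])) PySem.Set.empty,
                     gset x (c.flatMap (fun p => [(p.1, p), (p.2, p)])) PySem.Set.empty))) from rfl]
  rw [List.foldl_map]
  rw [foldl_insert_if_fresh _ _ _ _
      (PySem.Set.nodup_update _ _ (PySem.Set.nodup_ofList _))
      (fun x _ => PySem.Dict.contains_empty _)]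
  rw [show (PySem.Dict.empty : PySem.Dict Int (List Int)).items = [] from rfl, List.nil_append]
  dsimp only
  -- keys: the cannot-only tail never passes the filter
  rw [PySem.Set.update_eq_append_filter, List.filter_append]
  rw [show ((PySem.Set.ofList (c.flatMap (fun p => [p.1, p.2]))).filter
        (fun y => !(PySem.Set.contains (PySem.Set.ofList (m.flatMap (fun p => [p.1, p.2]))) y))).filter
        (fun x => !(gset x (m.flatMap (fun p => [(p.1, p), (p.2, p)])) PySem.Set.empty).isEmpty &&
                  !(gset x (c.flatMap (fun p => [(p.1, p), (p.2, p)])) PySem.Set.empty).isEmpty) = [] from by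
    rw [List.filter_eq_nil_iff]
    intro y hy
    obtain ⟨_, hnc⟩ := List.mem_filter.mp hy
    have hym : y ∉ m.flatMap (fun p => [p.1, p.2]) := by
      intro hmem
      have hc : PySem.Set.contains (PySem.Set.ofList (m.flatMap (fun p => [p.1, p.2]))) y = true := by
        have : y ∈ PySem.Set.ofList (m.flatMap (fun p => [p.1, p.2])) := by
          rw [PySem.Set.mem_ofList]; exact hmem
        simpa using this
      rw [hc] at hnc
      simp at hnc
    rw [gset_of_no_occ y _ _ (not_occ m y hym)]
    simp]
  rw [List.append_nil]
  -- on must keys the filter is exactly membership in the cannot elements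
  have hfilt : (PySem.Set.ofList (m.flatMap (fun p => [p.1, p.2]))).filter
        (fun x => !(gset x (m.flatMap (fun p => [(p.1, p), (p.2, p)])) PySem.Set.empty).isEmpty &&
                  !(gset x (c.flatMap (fun p => [(p.1, p), (p.2, p)])) PySem.Set.empty).isEmpty)
      = (PySem.Set.ofList (m.flatMap (fun p => [p.1, p.2]))).filter
        (fun x => (fbCannotElems c).contains x) := by
    apply List.filter_congr
    intro x hx
    rw [PySem.Set.mem_ofList] at hx
    have hM : (gset x (m.flatMap (fun p => [(p.1, p), (p.2, p)])) PySem.Set.empty).isEmpty = false := by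
      rw [List.isEmpty_eq_false_iff]
      exact gset_ne_nil x _ _ (exists_occ m x hx)
    by_cases hc : x ∈ c.flatMap (fun p => [p.1, p.2])
    · have hC : (gset x (c.flatMap (fun p => [(p.1, p), (p.2, p)])) PySem.Set.empty).isEmpty = false := by
        rw [List.isEmpty_eq_false_iff]
        exact gset_ne_nil x _ _ (exists_occ c x hc)
      have hce : (fbCannotElems c).contains x = true := by
        unfold fbCannotElems
        have : x ∈ PySem.Set.ofList (c.flatMap (fun p => [p.1, p.2])) := by
          rw [PySem.Set.mem_ofList]; exact hc
        simpa using this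
      rw [hM, hC, hce]
      rfl
    · have hC : gset x (c.flatMap (fun p => [(p.1, p), (p.2, p)])) PySem.Set.empty = [] :=
        gset_of_no_occ x _ _ (not_occ c x hc)
      have hce : (fbCannotElems c).contains x = false := by
        unfold fbCannotElems
        have : x ∉ PySem.Set.ofList (c.flatMap (fun p => [p.1, p.2])) := by
          rw [PySem.Set.mem_ofList]; exact hc
        simpa using this
      rw [hC, hce]
      simp
  rw [hfilt]
  -- values: union of the two indexed sets = the two rescans
  apply List.map_congr_left
  intro x _
  rw [show PySem.Set.union (gset x (m.flatMap (fun p => [(p.1, p), (p.2, p)])) PySem.Set.empty)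
        (gset x (c.flatMap (fun p => [(p.1, p), (p.2, p)])) PySem.Set.empty)
      = PySem.Set.update (gset x (m.flatMap (fun p => [(p.1, p), (p.2, p)])) PySem.Set.empty)
        (gset x (c.flatMap (fun p => [(p.1, p), (p.2, p)])) PySem.Set.empty) from rfl]
  rw [update_gset,
      show PySem.Set.update (gset x (m.flatMap (fun p => [(p.1, p), (p.2, p)])) PySem.Set.empty)
          PySem.Set.empty
        = gset x (m.flatMap (fun p => [(p.1, p), (p.2, p)])) PySem.Set.empty
        from PySem.Set.update_nil _,
      gather_eq_gset m x PySem.Set.empty, gather_eq_gset c x _]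

theorem B_canonical (m c : List (Int × Int)) :
    find_anchors_alt m c
      = ((PySem.Set.ofList (m.flatMap (fun p => [p.1, p.2]))).filter
            (fun x => (fbCannotElems c).contains x)).map
          (fun x => (x, PySem.Set.discard (fbGather c x (fbGather m x PySem.Set.empty)) x)) := by
  unfold find_anchors_alt
  show (m.foldl (fun st pr => [pr.1, pr.2].foldl (fbStep m c (fbCannotElems c)) st)
      (PySem.Set.empty, PySem.Dict.empty)).2.items = _
  rw [foldl_pairs_flat (fbStep m c (fbCannotElems c)) m (PySem.Set.empty, PySem.Dict.empty)]
  rw [fbFold m c (fbCannotElems c) _ PySem.Set.empty PySem.Dict.empty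
      (fun x h => by rw [PySem.Dict.contains_empty] at h; cases h)]
  rw [show (PySem.Dict.empty : PySem.Dict Int (List Int)).items = [] from rfl, List.nil_append]
  congr 1

-- ===== VERDICT (by name: the statement is the Claim_ definition above) =====
theorem find_anchors_spec : Claim_equal_find_anchors := by
  intro m c _
  unfold Spec_find_anchors
  rw [A_canonical, B_canonical]
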